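-- pv_equiv track=rewrite | github.com/ildhj0116/Work | Simulation_Trade/Basis/trace_minute_program/trace_minute_equity.py | Add_Exchange_For_Cnt
-- ===== SOURCE A (Python) =====
-- commodities={
-- 'DCE':['A','C','CS','M','Y','P','JD','L','PP','V','J','JM','I'],
-- 'CZC':['CF','SR','RM','TA','FG','MA','ZC'],
-- 'SHF':['CU','ZN','AL','NI','AU','AG','BU','RU','HC','RB'],
-- 'CFE':['IC','IH','IF','T','TF'],
-- 'ALL':['A','C','CS','M','Y','P','JD','L','PP','V','J','JM','I',
--        'CF','SR','RM','TA','FG','MA','ZC','CU','ZN','AL',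
--        'NI','AU','AG','BU','RU','HC','RB','IC','IH','IF','T','TF']}
--
-- def Add_Exchange_For_Cnt(cnt):
--     cmt = [x for x in cnt if not x.isdigit()]
--     cmt = "".join(cmt)
--     if cmt in commodities['DCE']:
--         return cnt+'.DCE'
--     elif cmt in commodities['CZC']:
--         return cnt+'.CZC'
--     elif cmt in commodities['SHF']:
--         return cnt+'.SHF'
--     else:
--         return cnt+'.CFE'
-- ===== SOURCE B (Python) =====
-- # B: one flat code->exchange dict with a .get default replaces the four-way membership chain.
-- _COMMODITIES = {
--     'DCE': ['A','C','CS','M','Y','P','JD','L','PP','V','J','JM','I'],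
--     'CZC': ['CF','SR','RM','TA','FG','MA','ZC'],
--     'SHF': ['CU','ZN','AL','NI','AU','AG','BU','RU','HC','RB'],
-- }
-- _EXCH = {c: ex for ex in ('DCE', 'CZC', 'SHF') for c in _COMMODITIES[ex]}
--
-- def Add_Exchange_For_Cnt(cnt):
--     cmt = ''.join(x for x in cnt if not x.isdigit())
--     return cnt + '.' + _EXCH.get(cmt, 'CFE')
-- ===== Notes on version B (the rewrite author's own statement) =====
-- stated objective: idiomatic
-- what changed: Replaces the four-way if/elif membership chain over per-exchange lists with one precomputed flat code-to-exchange dict and a single .get lookup whose default is the CFE fall-through.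
import Mathlib
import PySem

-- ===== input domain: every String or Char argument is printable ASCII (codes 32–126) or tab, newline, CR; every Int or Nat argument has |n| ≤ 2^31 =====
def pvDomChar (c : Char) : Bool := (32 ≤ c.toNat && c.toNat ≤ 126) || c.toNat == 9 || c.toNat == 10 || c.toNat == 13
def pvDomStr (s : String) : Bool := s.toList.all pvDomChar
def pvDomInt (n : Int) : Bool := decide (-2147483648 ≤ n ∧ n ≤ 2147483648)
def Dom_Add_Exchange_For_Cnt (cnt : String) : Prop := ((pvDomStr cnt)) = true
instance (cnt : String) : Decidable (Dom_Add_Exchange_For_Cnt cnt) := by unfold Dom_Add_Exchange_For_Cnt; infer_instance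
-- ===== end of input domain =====

-- B replaces A's four-way if/elif membership chain with one flat code→exchange dict
-- and a single lookup with 'CFE' as default (idiomatic; same cost in practice).

-- ===== PORT A =====
-- A's module-level 'commodities' dict
def pvCommodities : PySem.Dict String (List String) := PySem.Dict.ofList
  [("DCE", ["A","C","CS","M","Y","P","JD","L","PP","V","J","JM","I"]),
   ("CZC", ["CF","SR","RM","TA","FG","MA","ZC"]),
   ("SHF", ["CU","ZN","AL","NI","AU","AG","BU","RU","HC","RB"]),
   ("CFE", ["IC","IH","IF","T","TF"]),
   ("ALL", ["A","C","CS","M","Y","P","JD","L","PP","V","J","JM","I",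
            "CF","SR","RM","TA","FG","MA","ZC","CU","ZN","AL",
            "NI","AU","AG","BU","RU","HC","RB","IC","IH","IF","T","TF"])]

def Add_Exchange_For_Cnt (cnt : String) : String :=
  -- cmt = "".join([x for x in cnt if not x.isdigit()])  (the list items are single chars)
  let cmt : String := String.ofList (cnt.toList.filter (fun x => !PySem.Chars.isdigit x))
  if (PySem.Dict.getD pvCommodities "DCE" []).contains cmt then cnt ++ ".DCE"
  else if (PySem.Dict.getD pvCommodities "CZC" []).contains cmt then cnt ++ ".CZC"
  else if (PySem.Dict.getD pvCommodities "SHF" []).contains cmt then cnt ++ ".SHF"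
  else cnt ++ ".CFE"

-- ===== PORT B =====
def pvBCommodities : PySem.Dict String (List String) := PySem.Dict.ofList
  [("DCE", ["A","C","CS","M","Y","P","JD","L","PP","V","J","JM","I"]),
   ("CZC", ["CF","SR","RM","TA","FG","MA","ZC"]),
   ("SHF", ["CU","ZN","AL","NI","AU","AG","BU","RU","HC","RB"])]

-- _EXCH = {c: ex for ex in ('DCE','CZC','SHF') for c in _COMMODITIES[ex]}
def pvExch : PySem.Dict String String := PySem.Dict.ofList
  ((["DCE", "CZC", "SHF"] : List String).flatMap
    (fun ex => (PySem.Dict.getD pvBCommodities ex []).map (fun c => (c, ex))))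

def Add_Exchange_For_Cnt_alt (cnt : String) : String :=
  let cmt : String := String.ofList (cnt.toList.filter (fun x => !PySem.Chars.isdigit x))
  cnt ++ "." ++ PySem.Dict.getD pvExch cmt "CFE"

-- ===== PRECONDITION & SPEC =====
def Spec_Add_Exchange_For_Cnt (cnt : String) (out : String) : Prop := out = Add_Exchange_For_Cnt_alt cnt
instance (cnt : String) (out : String) : Decidable (Spec_Add_Exchange_For_Cnt cnt out) := by unfold Spec_Add_Exchange_For_Cnt; infer_instance

-- ===== CLAIM (what is proved, stated in full; the proofs are below) =====
def Claim_equal_Add_Exchange_For_Cnt : Prop := ∀ (cnt : String), Dom_Add_Exchange_For_Cnt cnt → Spec_Add_Exchange_For_Cnt cnt (Add_Exchange_For_Cnt cnt)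

-- ===== LEMMAS AND PROOFS =====

-- membership lookup in a constant-valued block of an association list
theorem get?_mk_map_const {ν : Type} (l : List String) (v : ν)
    (rest : List (String × ν)) (s : String) :
    (PySem.Dict.mk (l.map (fun k => (k, v)) ++ rest)).get? s =
      if l.contains s then some v else (PySem.Dict.mk rest).get? s := by
  induction l with
  | nil => simp
  | cons k l ih =>
    rw [List.map_cons, List.cons_append, PySem.Dict.get?_mk_cons]
    by_cases h : (k == s)
    · have hs : s = k := (beq_iff_eq.mp h).symm
      simp [hs]
    · have hne : s ≠ k := fun e => h (beq_iff_eq.mpr e.symm)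
      simp [h, ih, hne]

theorem pvExch_lookup (s : String) :
    PySem.Dict.getD pvExch s "CFE" =
      if (["A","C","CS","M","Y","P","JD","L","PP","V","J","JM","I"] : List String).contains s then "DCE"
      else if (["CF","SR","RM","TA","FG","MA","ZC"] : List String).contains s then "CZC"
      else if (["CU","ZN","AL","NI","AU","AG","BU","RU","HC","RB"] : List String).contains s then "SHF"
      else "CFE" := by
  have htab : pvExch = PySem.Dict.mk
      ((["A","C","CS","M","Y","P","JD","L","PP","V","J","JM","I"] : List String).map (fun k => (k, "DCE")) ++
       ((["CF","SR","RM","TA","FG","MA","ZC"] : List String).map (fun k => (k, "CZC")) ++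
        ((["CU","ZN","AL","NI","AU","AG","BU","RU","HC","RB"] : List String).map (fun k => (k, "SHF")) ++ []))) := by
    decide
  rw [htab, PySem.Dict.getD_eq_get?_getD, get?_mk_map_const, get?_mk_map_const, get?_mk_map_const]
  split_ifs <;> rfl

-- ===== VERDICT (by name: the statement is the Claim_ definition above) =====
theorem Add_Exchange_For_Cnt_spec : Claim_equal_Add_Exchange_For_Cnt := by
  intro cnt _
  unfold Spec_Add_Exchange_For_Cnt Add_Exchange_For_Cnt Add_Exchange_For_Cnt_alt
  dsimp only
  have h1 : PySem.Dict.getD pvCommodities "DCE" [] =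
      ["A","C","CS","M","Y","P","JD","L","PP","V","J","JM","I"] := by decide
  have h2 : PySem.Dict.getD pvCommodities "CZC" [] =
      ["CF","SR","RM","TA","FG","MA","ZC"] := by decide
  have h3 : PySem.Dict.getD pvCommodities "SHF" [] =
      ["CU","ZN","AL","NI","AU","AG","BU","RU","HC","RB"] := by decide
  simp only [pvExch_lookup, h1, h2, h3]
  split_ifs <;> simp [String.append_assoc]
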